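-- pv_equiv track=rewrite | github.com/LucasCerqueiraGalvao/cotation-scraper | quote_comparison.py | build_hapag_map_from_columns
-- ===== SOURCE A (Python) =====
-- def build_hapag_map_from_columns(columns) -> dict:
--     """
--     Monta o mapeamento da Hapag automaticamente por prefixo.
--
--     OBS: ignora "Ocean Freight" (seco) pra não duplicar com
--     "Freight Charges | Ocean Freight | 20STD".
--     """
--     cols = [str(c) for c in columns]
--
--     hapag_map = {
--         "ocean_freight": [],
--         "export_surcharges": [],
--         "freight_surcharges": [],
--         "import_surcharges": [],
--     }
--
--     for c in cols:
--         c_strip = c.strip()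
--
--         # ignora total estimado (pra não duplicar soma)
--         if c_strip.startswith("Estimated Total |"):
--             continue
--
--         # ignora Ocean Freight "seco" (duplicaria)
--         if c_strip == "Ocean Freight":
--             continue
--
--         # export
--         if c_strip.startswith("Export Surcharges |") and c_strip.endswith("| 20STD"):
--             hapag_map["export_surcharges"].append(c)
--             continue
--
--         # freight surcharges
--         if c_strip.startswith("Freight Surcharges |") and c_strip.endswith("| 20STD"):
--             hapag_map["freight_surcharges"].append(c)
--             continue
--
--         # import
--         if c_strip.startswith("Import Surcharges |") and c_strip.endswith("| 20STD"):
--             hapag_map["import_surcharges"].append(c)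
--             continue
--
--         # ocean freight detalhado
--         if c_strip.startswith("Freight Charges | Ocean Freight |") and c_strip.endswith("| 20STD"):
--             hapag_map["ocean_freight"].append(c)
--             continue
--
--     # remover duplicatas preservando ordem
--     for k in hapag_map:
--         hapag_map[k] = list(dict.fromkeys(hapag_map[k]))
--
--     return hapag_map
-- ===== SOURCE B (Python) =====
-- def build_hapag_map_from_columns(columns) -> dict:
--     """Bucket columns by category prefix: four independent filter passes, one per bucket."""
--     cols = [str(c) for c in columns]
--
--     def bucket(prefix):
--         return list(dict.fromkeys(
--             c for c in cols
--             if c.strip().startswith(prefix) and c.strip().endswith("| 20STD")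
--         ))
--
--     return {
--         "ocean_freight": bucket("Freight Charges | Ocean Freight |"),
--         "export_surcharges": bucket("Export Surcharges |"),
--         "freight_surcharges": bucket("Freight Surcharges |"),
--         "import_surcharges": bucket("Import Surcharges |"),
--     }
-- ===== Notes on version B (the rewrite author's own statement) =====
-- stated objective: simpler
-- what changed: Replaces the single loop with its six-way branch chain, mutable dict, and two skip guards by four independent filter-and-dedup passes (one per bucket); the skip guards are dropped because a skipped column can never satisfy any bucket's prefix+suffix test.
import Mathlib
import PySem

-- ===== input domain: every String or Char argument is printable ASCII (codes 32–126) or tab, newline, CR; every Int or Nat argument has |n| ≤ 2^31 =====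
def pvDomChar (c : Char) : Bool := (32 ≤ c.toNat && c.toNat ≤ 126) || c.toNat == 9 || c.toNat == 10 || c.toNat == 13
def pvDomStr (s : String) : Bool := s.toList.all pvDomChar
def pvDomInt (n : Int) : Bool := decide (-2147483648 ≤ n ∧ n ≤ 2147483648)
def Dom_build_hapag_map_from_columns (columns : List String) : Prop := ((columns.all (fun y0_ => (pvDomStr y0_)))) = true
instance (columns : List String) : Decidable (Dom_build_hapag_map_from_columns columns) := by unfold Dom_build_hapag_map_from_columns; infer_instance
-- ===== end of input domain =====

-- B replaces A's single loop (branch chain + mutable dict + skip guards) by four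
-- independent filter-and-dedup passes, one per bucket; same output, similar cost.

-- ===== PORT A =====
-- the body of A's 'for c in cols' loop, step for step (same branch order)
def pvStepA (d : PySem.Dict String (List String)) (c : String) :
    PySem.Dict String (List String) :=
  let c_strip := PySem.Str.strip c
  if PySem.Str.startswith c_strip "Estimated Total |" then d
  else if c_strip == "Ocean Freight" then d
  else if PySem.Str.startswith c_strip "Export Surcharges |" && PySem.Str.endswith c_strip "| 20STD" then
    d.modify "export_surcharges" [] (· ++ [c])
  else if PySem.Str.startswith c_strip "Freight Surcharges |" && PySem.Str.endswith c_strip "| 20STD" then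
    d.modify "freight_surcharges" [] (· ++ [c])
  else if PySem.Str.startswith c_strip "Import Surcharges |" && PySem.Str.endswith c_strip "| 20STD" then
    d.modify "import_surcharges" [] (· ++ [c])
  else if PySem.Str.startswith c_strip "Freight Charges | Ocean Freight |" && PySem.Str.endswith c_strip "| 20STD" then
    d.modify "ocean_freight" [] (· ++ [c])
  else d

def build_hapag_map_from_columns (columns : List String) : List (String × List String) :=
  let cols := columns.map (fun c => c)   -- str(c) is the identity on str
  let hapag_map : PySem.Dict String (List String) :=
    PySem.Dict.ofList [("ocean_freight", []), ("export_surcharges", []),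
                       ("freight_surcharges", []), ("import_surcharges", [])]
  let hapag_map := cols.foldl pvStepA hapag_map
  -- for k in hapag_map: hapag_map[k] = list(dict.fromkeys(hapag_map[k]))
  let hapag_map := hapag_map.keys.foldl (fun d k => d.modify k [] PySem.List.dedup) hapag_map
  hapag_map.items

-- ===== PORT B =====
-- B's bucket test: c.strip().startswith(pre) and c.strip().endswith("| 20STD")
def pvP (pre : String) (c : String) : Bool :=
  PySem.Str.startswith (PySem.Str.strip c) pre && PySem.Str.endswith (PySem.Str.strip c) "| 20STD"

-- B's 'bucket': one filtering pass over cols, deduplicated via dict.fromkeys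
def pvBucket (cols : List String) (pre : String) : List String :=
  PySem.List.dedup (cols.filter (pvP pre))

def build_hapag_map_from_columns_alt (columns : List String) : List (String × List String) :=
  let cols := columns.map (fun c => c)
  [("ocean_freight", pvBucket cols "Freight Charges | Ocean Freight |"),
   ("export_surcharges", pvBucket cols "Export Surcharges |"),
   ("freight_surcharges", pvBucket cols "Freight Surcharges |"),
   ("import_surcharges", pvBucket cols "Import Surcharges |")]

-- ===== PRECONDITION & SPEC =====
def Spec_build_hapag_map_from_columns (columns : List String) (out : List (String × List String)) : Prop := out = build_hapag_map_from_columns_alt columns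
instance (columns : List String) (out : List (String × List String)) : Decidable (Spec_build_hapag_map_from_columns columns out) := by unfold Spec_build_hapag_map_from_columns; infer_instance

-- ===== CLAIM (what is proved, stated in full; the proofs are below) =====
def Claim_equal_build_hapag_map_from_columns : Prop := ∀ (columns : List String), Dom_build_hapag_map_from_columns columns → Spec_build_hapag_map_from_columns columns (build_hapag_map_from_columns columns)

-- ===== LEMMAS AND PROOFS =====

-- two string prefixes that are not prefixes of one another never both start the same string
lemma pv_excl (p q : String) (hp : ¬ p.toList <+: q.toList) (hq : ¬ q.toList <+: p.toList)
    (s : String) (h : PySem.Str.startswith s p = true) : PySem.Str.startswith s q = false := by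
  rw [Bool.eq_false_iff]
  intro h2
  rw [PySem.Str.startswith_eq, PySem.Chars.startswith_iff] at h h2
  rcases List.prefix_or_prefix_of_prefix h h2 with hh | hh
  · exact hp hh
  · exact hq hh

-- one iteration of A's loop appends c to exactly the bucket whose pvP test c passes
lemma pvStepA_eq (o e f i : List String) (c : String) :
    pvStepA (PySem.Dict.mk [("ocean_freight", o), ("export_surcharges", e),
        ("freight_surcharges", f), ("import_surcharges", i)]) c =
    PySem.Dict.mk [("ocean_freight", o ++ if pvP "Freight Charges | Ocean Freight |" c then [c] else []),
        ("export_surcharges", e ++ if pvP "Export Surcharges |" c then [c] else []),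
        ("freight_surcharges", f ++ if pvP "Freight Surcharges |" c then [c] else []),
        ("import_surcharges", i ++ if pvP "Import Surcharges |" c then [c] else [])] := by
  by_cases h1 : PySem.Str.startswith (PySem.Str.strip c) "Estimated Total |" = true
  · -- skipped by the first guard: no bucket test can pass (incompatible prefixes)
    have sE := pv_excl "Estimated Total |" "Export Surcharges |" (by decide) (by decide) _ h1
    have sF := pv_excl "Estimated Total |" "Freight Surcharges |" (by decide) (by decide) _ h1
    have sI := pv_excl "Estimated Total |" "Import Surcharges |" (by decide) (by decide) _ h1
    have sO := pv_excl "Estimated Total |" "Freight Charges | Ocean Freight |" (by decide) (by decide) _ h1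
    simp at h1 sE sF sI sO
    simp [pvStepA, pvP, h1, sE, sF, sI, sO]
  · by_cases h2 : (PySem.Str.strip c == "Ocean Freight") = true
    · -- skipped by the second guard: "Ocean Freight" does not end with "| 20STD"
      have hc : PySem.Str.strip c = "Ocean Freight" := by simpa using h2
      have hc' := congrArg String.toList hc
      simp at hc'
      have hEnd : PySem.Chars.endswith (PySem.Chars.strip c.toList) "| 20STD".toList = false := by
        rw [hc']; decide
      simp at h1 hEnd
      simp [pvStepA, pvP, h1, h2, hEnd]
    · by_cases h3 : (PySem.Str.startswith (PySem.Str.strip c) "Export Surcharges |" && PySem.Str.endswith (PySem.Str.strip c) "| 20STD") = true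
      · have h3s := ((Bool.and_eq_true _ _).mp h3).1
        have sF := pv_excl "Export Surcharges |" "Freight Surcharges |" (by decide) (by decide) _ h3s
        have sI := pv_excl "Export Surcharges |" "Import Surcharges |" (by decide) (by decide) _ h3s
        have sO := pv_excl "Export Surcharges |" "Freight Charges | Ocean Freight |" (by decide) (by decide) _ h3s
        simp at h1 h2 h3 sF sI sO
        simp [pvStepA, pvP, h1, h2, h3, sF, sI, sO,
              PySem.Dict.modify, PySem.Dict.insert, PySem.Dict.getD,
              PySem.Dict.get?, PySem.Dict.contains]
      · by_cases h4 : (PySem.Str.startswith (PySem.Str.strip c) "Freight Surcharges |" && PySem.Str.endswith (PySem.Str.strip c) "| 20STD") = true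
        · have h4s := ((Bool.and_eq_true _ _).mp h4).1
          have sE := pv_excl "Freight Surcharges |" "Export Surcharges |" (by decide) (by decide) _ h4s
          have sI := pv_excl "Freight Surcharges |" "Import Surcharges |" (by decide) (by decide) _ h4s
          have sO := pv_excl "Freight Surcharges |" "Freight Charges | Ocean Freight |" (by decide) (by decide) _ h4s
          simp at h1 h2 h4 sE sI sO
          simp [pvStepA, pvP, h1, h2, h4, sE, sI, sO,
                PySem.Dict.modify, PySem.Dict.insert, PySem.Dict.getD,
                PySem.Dict.get?, PySem.Dict.contains]
        · by_cases h5 : (PySem.Str.startswith (PySem.Str.strip c) "Import Surcharges |" && PySem.Str.endswith (PySem.Str.strip c) "| 20STD") = true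
          · have h5s := ((Bool.and_eq_true _ _).mp h5).1
            have sE := pv_excl "Import Surcharges |" "Export Surcharges |" (by decide) (by decide) _ h5s
            have sF := pv_excl "Import Surcharges |" "Freight Surcharges |" (by decide) (by decide) _ h5s
            have sO := pv_excl "Import Surcharges |" "Freight Charges | Ocean Freight |" (by decide) (by decide) _ h5s
            simp at h1 h2 h5 sE sF sO
            simp [pvStepA, pvP, h1, h2, h5, sE, sF, sO,
                  PySem.Dict.modify, PySem.Dict.insert, PySem.Dict.getD,
                  PySem.Dict.get?, PySem.Dict.contains]
          · by_cases h6 : (PySem.Str.startswith (PySem.Str.strip c) "Freight Charges | Ocean Freight |" && PySem.Str.endswith (PySem.Str.strip c) "| 20STD") = true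
            · have h6s := ((Bool.and_eq_true _ _).mp h6).1
              have sE := pv_excl "Freight Charges | Ocean Freight |" "Export Surcharges |" (by decide) (by decide) _ h6s
              have sF := pv_excl "Freight Charges | Ocean Freight |" "Freight Surcharges |" (by decide) (by decide) _ h6s
              have sI := pv_excl "Freight Charges | Ocean Freight |" "Import Surcharges |" (by decide) (by decide) _ h6s
              simp at h1 h2 h6 sE sF sI
              simp [pvStepA, pvP, h1, h2, h6, sE, sF, sI,
                    PySem.Dict.modify, PySem.Dict.insert, PySem.Dict.getD,
                    PySem.Dict.get?, PySem.Dict.contains]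
            · simp at h1 h2 h3 h4 h5 h6
              simp [pvStepA, pvP, h1, h2]
              split_ifs <;> simp_all

-- A's whole loop appends, per bucket, exactly the columns that pass that bucket's pvP test
lemma pv_loopA (cols : List String) (o e f i : List String) :
    cols.foldl pvStepA (PySem.Dict.mk [("ocean_freight", o), ("export_surcharges", e),
        ("freight_surcharges", f), ("import_surcharges", i)]) =
    PySem.Dict.mk [("ocean_freight", o ++ cols.filter (pvP "Freight Charges | Ocean Freight |")),
        ("export_surcharges", e ++ cols.filter (pvP "Export Surcharges |")),
        ("freight_surcharges", f ++ cols.filter (pvP "Freight Surcharges |")),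
        ("import_surcharges", i ++ cols.filter (pvP "Import Surcharges |"))] := by
  induction cols generalizing o e f i with
  | nil => simp
  | cons c rest ih =>
    rw [List.foldl_cons, pvStepA_eq, ih]
    simp only [List.filter_cons, List.append_assoc]
    split_ifs <;> simp_all

-- ===== VERDICT (by name: the statement is the Claim_ definition above) =====
theorem build_hapag_map_from_columns_spec : Claim_equal_build_hapag_map_from_columns := by
  intro columns _
  show build_hapag_map_from_columns columns = build_hapag_map_from_columns_alt columns
  simp only [build_hapag_map_from_columns, build_hapag_map_from_columns_alt, List.map_id']
  rw [show (PySem.Dict.ofList [("ocean_freight", ([] : List String)), ("export_surcharges", []),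
        ("freight_surcharges", []), ("import_surcharges", [])] : PySem.Dict String (List String)) =
      PySem.Dict.mk [("ocean_freight", []), ("export_surcharges", []),
        ("freight_surcharges", []), ("import_surcharges", [])] from by decide]
  rw [pv_loopA]
  simp only [PySem.Dict.keys_mk, List.map_cons, List.map_nil, List.foldl_cons, List.foldl_nil,
    List.nil_append]
  simp [PySem.Dict.modify, PySem.Dict.insert, PySem.Dict.getD, PySem.Dict.get?,
        PySem.Dict.contains, pvBucket]
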